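-- pv_equiv track=rewrite | github.com/AFun9/MOSS-TTS-Nano | export_v2/wrappers/decode_step.py | io_names
-- ===== SOURCE A (Python) =====
-- def io_names(num_layers: int):
--     in_names = ["input_ids", "past_valid_lengths"]
--     for i in range(num_layers):
--         in_names.append(f"past_key_{i}")
--         in_names.append(f"past_value_{i}")
--     out_names = ["global_hidden"]
--     for i in range(num_layers):
--         out_names.append(f"present_key_{i}")
--         out_names.append(f"present_value_{i}")
--     dyn_axes = {
--         "input_ids": {0: "batch", 1: "step_seq"},
--         "past_valid_lengths": {0: "batch"},
--         "global_hidden": {0: "batch", 1: "step_seq"},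
--     }
--     for i in range(num_layers):
--         dyn_axes[f"past_key_{i}"] = {0: "batch", 1: "past_seq"}
--         dyn_axes[f"past_value_{i}"] = {0: "batch", 1: "past_seq"}
--         dyn_axes[f"present_key_{i}"] = {0: "batch", 1: "total_seq"}
--         dyn_axes[f"present_value_{i}"] = {0: "batch", 1: "total_seq"}
--     return in_names, out_names, dyn_axes
-- ===== SOURCE B (Python) =====
-- def io_names(num_layers: int):
--     layer_keys = [f"{p}_{i}" for i in range(num_layers)
--                   for p in ("past_key", "past_value", "present_key", "present_value")]
--     keys = ["input_ids", "past_valid_lengths", "global_hidden"] + layer_keys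
--
--     def axes(name):
--         if name == "past_valid_lengths":
--             return {0: "batch"}
--         if name.startswith("past_"):
--             return {0: "batch", 1: "past_seq"}
--         if name.startswith("present_"):
--             return {0: "batch", 1: "total_seq"}
--         return {0: "batch", 1: "step_seq"}
--
--     dyn_axes = {k: axes(k) for k in keys}
--     in_names = keys[:2] + [k for k in layer_keys if k.startswith("past_")]
--     out_names = ["global_hidden"] + [k for k in layer_keys if k.startswith("present_")]
--     return in_names, out_names, dyn_axes
-- ===== Notes on version B (the rewrite author's own statement) =====
-- stated objective: alternative
-- what changed: B builds the key list once and derives the dynamic-axes dict in a single comprehension that classifies each name by prefix (and filters the per-layer keys by prefix for in/out name lists), replacing A's three separate range(num_layers) loops with per-layer appends and dict assignments.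
import Mathlib
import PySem

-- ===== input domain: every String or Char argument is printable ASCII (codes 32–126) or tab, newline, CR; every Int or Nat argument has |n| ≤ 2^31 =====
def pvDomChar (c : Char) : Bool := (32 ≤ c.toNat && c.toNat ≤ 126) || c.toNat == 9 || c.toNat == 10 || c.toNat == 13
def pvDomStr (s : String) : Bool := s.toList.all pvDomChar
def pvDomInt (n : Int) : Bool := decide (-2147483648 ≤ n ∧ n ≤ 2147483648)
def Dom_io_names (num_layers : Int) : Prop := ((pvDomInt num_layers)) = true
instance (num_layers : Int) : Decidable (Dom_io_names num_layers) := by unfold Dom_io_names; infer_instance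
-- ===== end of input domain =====

-- B builds the ONNX name lists and derives the dynamic-axes dict in one comprehension over the
-- key list, classifying each name by prefix, instead of A's three separate range(num_layers)
-- loops with per-layer dict assignments (objective: alternative decomposition, same cost).

-- ===== PORT A =====
def io_names (num_layers : Int) : List String × List String × (List (String × List (Int × String))) :=
  let in_names := (PySem.List.pyRange 0 num_layers 1).foldl
    (fun acc i => (acc ++ ["past_key_" ++ PySem.Int.toStr i]) ++ ["past_value_" ++ PySem.Int.toStr i])
    ["input_ids", "past_valid_lengths"]
  let out_names := (PySem.List.pyRange 0 num_layers 1).foldl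
    (fun acc i => (acc ++ ["present_key_" ++ PySem.Int.toStr i]) ++ ["present_value_" ++ PySem.Int.toStr i])
    ["global_hidden"]
  let dyn_axes := (PySem.List.pyRange 0 num_layers 1).foldl
    (fun d i =>
      (((d.insert ("past_key_" ++ PySem.Int.toStr i) [((0 : Int), "batch"), (1, "past_seq")]).insert
        ("past_value_" ++ PySem.Int.toStr i) [((0 : Int), "batch"), (1, "past_seq")]).insert
        ("present_key_" ++ PySem.Int.toStr i) [((0 : Int), "batch"), (1, "total_seq")]).insert
        ("present_value_" ++ PySem.Int.toStr i) [((0 : Int), "batch"), (1, "total_seq")])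
    (PySem.Dict.ofList
      [("input_ids", [((0 : Int), "batch"), (1, "step_seq")]),
       ("past_valid_lengths", [((0 : Int), "batch")]),
       ("global_hidden", [((0 : Int), "batch"), (1, "step_seq")])])
  (in_names, out_names, dyn_axes.items)

-- ===== PORT B =====
-- axis dict for a name, chosen by prefix (helper `axes` in Source B)
def pvAxes (name : String) : List (Int × String) :=
  if name = "past_valid_lengths" then [((0 : Int), "batch")]
  else if PySem.Str.startswith name "past_" then [((0 : Int), "batch"), (1, "past_seq")]
  else if PySem.Str.startswith name "present_" then [((0 : Int), "batch"), (1, "total_seq")]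
  else [((0 : Int), "batch"), (1, "step_seq")]

def io_names_alt (num_layers : Int) : List String × List String × (List (String × List (Int × String))) :=
  let layer_keys := (PySem.List.pyRange 0 num_layers 1).flatMap
    (fun i => ["past_key", "past_value", "present_key", "present_value"].map
      (fun p => p ++ "_" ++ PySem.Int.toStr i))
  let keys := ["input_ids", "past_valid_lengths", "global_hidden"] ++ layer_keys
  let dyn_axes := PySem.Dict.ofList (keys.map (fun k => (k, pvAxes k)))
  let in_names := PySem.List.slice keys none (some 2) ++
    layer_keys.filter (fun k => PySem.Str.startswith k "past_")
  let out_names := ["global_hidden"] ++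
    layer_keys.filter (fun k => PySem.Str.startswith k "present_")
  (in_names, out_names, dyn_axes.items)

-- ===== PRECONDITION & SPEC =====
def Spec_io_names (num_layers : Int) (out : List String × List String × (List (String × List (Int × String)))) : Prop := out = io_names_alt num_layers
instance (num_layers : Int) (out : List String × List String × (List (String × List (Int × String)))) : Decidable (Spec_io_names num_layers out) := by unfold Spec_io_names; infer_instance

-- ===== CLAIM (what is proved, stated in full; the proofs are below) =====
def Claim_equal_io_names : Prop := ∀ (num_layers : Int), Dom_io_names num_layers → Spec_io_names num_layers (io_names num_layers)

-- ===== LEMMAS AND PROOFS =====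

-- a literal-prefixed string never equals a string the literal is no prefix of
theorem pvNeOfAppend (a b s : String) (h : ¬ a.toList <+: b.toList) : a ++ s ≠ b := by
  intro he
  exact h ⟨s.toList, by rw [← String.toList_append, he]⟩

theorem pvSwTrue (a p s : String) (h : p.toList <+: a.toList) :
    PySem.Str.startswith (a ++ s) p = true := by
  simp only [PySem.Str.startswith, String.toList_append]
  rw [PySem.Chars.startswith_iff]
  exact h.trans (List.prefix_append _ _)

theorem pvSwFalse (a p s : String) (hlen : p.toList.length ≤ a.toList.length)
    (h : ¬ p.toList <+: a.toList) : PySem.Str.startswith (a ++ s) p = false := by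
  simp only [PySem.Str.startswith, String.toList_append]
  rw [Bool.eq_false_iff, ne_eq, PySem.Chars.startswith_iff]
  rintro ⟨t, ht⟩
  apply h
  have htake := congrArg (List.take p.toList.length) ht
  rw [List.take_left, List.take_append, Nat.sub_eq_zero_of_le hlen,
      List.take_zero, List.append_nil] at htake
  exact htake ▸ List.take_prefix _ _

-- B's f-string keys coincide with A's literal-prefix keys
theorem pvKey_pk (s : String) : "past_key" ++ "_" ++ s = "past_key_" ++ s := rfl
theorem pvKey_pv (s : String) : "past_value" ++ "_" ++ s = "past_value_" ++ s := rfl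
theorem pvKey_prk (s : String) : "present_key" ++ "_" ++ s = "present_key_" ++ s := rfl
theorem pvKey_prv (s : String) : "present_value" ++ "_" ++ s = "present_value_" ++ s := rfl

theorem pvAxes_pk (s : String) :
    pvAxes ("past_key_" ++ s) = [((0 : Int), "batch"), (1, "past_seq")] := by
  unfold pvAxes
  rw [if_neg (pvNeOfAppend _ _ _ (by decide)), if_pos (pvSwTrue _ _ _ (by decide))]

theorem pvAxes_pv (s : String) :
    pvAxes ("past_value_" ++ s) = [((0 : Int), "batch"), (1, "past_seq")] := by
  unfold pvAxes
  rw [if_neg (pvNeOfAppend _ _ _ (by decide)), if_pos (pvSwTrue _ _ _ (by decide))]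

theorem pvAxes_prk (s : String) :
    pvAxes ("present_key_" ++ s) = [((0 : Int), "batch"), (1, "total_seq")] := by
  unfold pvAxes
  rw [if_neg (pvNeOfAppend _ _ _ (by decide)),
      if_neg (by rw [pvSwFalse _ _ _ (by decide) (by decide)]; exact Bool.false_ne_true),
      if_pos (pvSwTrue _ _ _ (by decide))]

theorem pvAxes_prv (s : String) :
    pvAxes ("present_value_" ++ s) = [((0 : Int), "batch"), (1, "total_seq")] := by
  unfold pvAxes
  rw [if_neg (pvNeOfAppend _ _ _ (by decide)),
      if_neg (by rw [pvSwFalse _ _ _ (by decide) (by decide)]; exact Bool.false_ne_true),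
      if_pos (pvSwTrue _ _ _ (by decide))]

-- 'append two singletons each step' is a flatMap of two-element lists
theorem pvFoldlTwo {α β : Type} (l : List α) (f g : α → β) (acc : List β) :
    l.foldl (fun a x => (a ++ [f x]) ++ [g x]) acc = acc ++ l.flatMap (fun x => [f x, g x]) := by
  induction l generalizing acc with
  | nil => simp
  | cons x t ih => simp [List.foldl_cons, List.flatMap]

-- a fold whose step folds a block is the fold of the flattened blocks
theorem pvFoldlFlatMap {α β σ : Type} (l : List α) (g : α → List β) (f : σ → β → σ) (init : σ) :
    l.foldl (fun s a => (g a).foldl f s) init = (l.flatMap g).foldl f init := by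
  induction l generalizing init with
  | nil => rfl
  | cons x t ih => simp [List.foldl_append, ih]

theorem pvUpdateAppend {κ ν : Type} [BEq κ] (d : PySem.Dict κ ν) (ps qs : List (κ × ν)) :
    d.update (ps ++ qs) = (d.update ps).update qs := by
  simp [PySem.Dict.update]

theorem pvFilterFlatMap {α β : Type} (l : List α) (g : α → List β) (p : β → Bool) :
    (l.flatMap g).filter p = l.flatMap (fun a => (g a).filter p) := by
  induction l with
  | nil => rfl
  | cons x t ih => simp [List.filter_append, ih]

-- concrete startswith facts for the four per-layer key shapes
theorem pvSw1 (s : String) : PySem.Str.startswith ("past_key_" ++ s) "past_" = true := pvSwTrue _ _ _ (by decide)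
theorem pvSw2 (s : String) : PySem.Str.startswith ("past_value_" ++ s) "past_" = true := pvSwTrue _ _ _ (by decide)
theorem pvSw3 (s : String) : PySem.Str.startswith ("present_key_" ++ s) "past_" = false := pvSwFalse _ _ _ (by decide) (by decide)
theorem pvSw4 (s : String) : PySem.Str.startswith ("present_value_" ++ s) "past_" = false := pvSwFalse _ _ _ (by decide) (by decide)
theorem pvSw5 (s : String) : PySem.Str.startswith ("present_key_" ++ s) "present_" = true := pvSwTrue _ _ _ (by decide)
theorem pvSw6 (s : String) : PySem.Str.startswith ("present_value_" ++ s) "present_" = true := pvSwTrue _ _ _ (by decide)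
theorem pvSw7 (s : String) : PySem.Str.startswith ("past_key_" ++ s) "present_" = false := pvSwFalse _ _ _ (by decide) (by decide)
theorem pvSw8 (s : String) : PySem.Str.startswith ("past_value_" ++ s) "present_" = false := pvSwFalse _ _ _ (by decide) (by decide)

-- B's layer_keys list (proof-side abbreviation of the let-binding in io_names_alt)
def pvLK (n : Int) : List String :=
  (PySem.List.pyRange 0 n 1).flatMap
    (fun i => ["past_key", "past_value", "present_key", "present_value"].map
      (fun p => p ++ "_" ++ PySem.Int.toStr i))

theorem pvFilterPast (i : Int) :
    (["past_key", "past_value", "present_key", "present_value"].map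
      (fun p => p ++ "_" ++ PySem.Int.toStr i)).filter (fun k => PySem.Str.startswith k "past_")
    = ["past_key_" ++ PySem.Int.toStr i, "past_value_" ++ PySem.Int.toStr i] := by
  simp only [List.map_cons, List.map_nil, pvKey_pk, pvKey_pv, pvKey_prk, pvKey_prv,
    List.filter_cons, List.filter_nil, pvSw1, pvSw2, pvSw3, pvSw4]
  simp

theorem pvFilterPresent (i : Int) :
    (["past_key", "past_value", "present_key", "present_value"].map
      (fun p => p ++ "_" ++ PySem.Int.toStr i)).filter (fun k => PySem.Str.startswith k "present_")
    = ["present_key_" ++ PySem.Int.toStr i, "present_value_" ++ PySem.Int.toStr i] := by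
  simp only [List.map_cons, List.map_nil, pvKey_pk, pvKey_pv, pvKey_prk, pvKey_prv,
    List.filter_cons, List.filter_nil, pvSw5, pvSw6, pvSw7, pvSw8]
  simp

theorem pvInEq (n : Int) :
    (PySem.List.pyRange 0 n 1).foldl
      (fun acc i => (acc ++ ["past_key_" ++ PySem.Int.toStr i]) ++ ["past_value_" ++ PySem.Int.toStr i])
      ["input_ids", "past_valid_lengths"]
    = PySem.List.slice (["input_ids", "past_valid_lengths", "global_hidden"] ++ pvLK n) none (some 2) ++
      (pvLK n).filter (fun k => PySem.Str.startswith k "past_") := by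
  rw [pvFoldlTwo, PySem.List.slice_to _ (by norm_num)]
  unfold pvLK
  rw [pvFilterFlatMap]
  simp only [pvFilterPast]
  simp

theorem pvOutEq (n : Int) :
    (PySem.List.pyRange 0 n 1).foldl
      (fun acc i => (acc ++ ["present_key_" ++ PySem.Int.toStr i]) ++ ["present_value_" ++ PySem.Int.toStr i])
      ["global_hidden"]
    = ["global_hidden"] ++ (pvLK n).filter (fun k => PySem.Str.startswith k "present_") := by
  rw [pvFoldlTwo]
  unfold pvLK
  rw [pvFilterFlatMap]
  simp only [pvFilterPresent]

-- the four (key, value) pairs layer i contributes, in A's insertion order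
def pvQuad (i : Int) : List (String × List (Int × String)) :=
  [("past_key_" ++ PySem.Int.toStr i, [((0 : Int), "batch"), (1, "past_seq")]),
   ("past_value_" ++ PySem.Int.toStr i, [((0 : Int), "batch"), (1, "past_seq")]),
   ("present_key_" ++ PySem.Int.toStr i, [((0 : Int), "batch"), (1, "total_seq")]),
   ("present_value_" ++ PySem.Int.toStr i, [((0 : Int), "batch"), (1, "total_seq")])]

def pvInit : PySem.Dict String (List (Int × String)) :=
  PySem.Dict.ofList
    [("input_ids", [((0 : Int), "batch"), (1, "step_seq")]),
     ("past_valid_lengths", [((0 : Int), "batch")]),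
     ("global_hidden", [((0 : Int), "batch"), (1, "step_seq")])]

theorem pvDynEq (n : Int) :
    (PySem.List.pyRange 0 n 1).foldl
      (fun d i =>
        (((d.insert ("past_key_" ++ PySem.Int.toStr i) [((0 : Int), "batch"), (1, "past_seq")]).insert
          ("past_value_" ++ PySem.Int.toStr i) [((0 : Int), "batch"), (1, "past_seq")]).insert
          ("present_key_" ++ PySem.Int.toStr i) [((0 : Int), "batch"), (1, "total_seq")]).insert
          ("present_value_" ++ PySem.Int.toStr i) [((0 : Int), "batch"), (1, "total_seq")])
      pvInit
    = PySem.Dict.ofList ((["input_ids", "past_valid_lengths", "global_hidden"] ++ pvLK n).map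
        (fun k => (k, pvAxes k))) := by
  have hstep :
      (PySem.List.pyRange 0 n 1).foldl
        (fun d i =>
          (((d.insert ("past_key_" ++ PySem.Int.toStr i) [((0 : Int), "batch"), (1, "past_seq")]).insert
            ("past_value_" ++ PySem.Int.toStr i) [((0 : Int), "batch"), (1, "past_seq")]).insert
            ("present_key_" ++ PySem.Int.toStr i) [((0 : Int), "batch"), (1, "total_seq")]).insert
            ("present_value_" ++ PySem.Int.toStr i) [((0 : Int), "batch"), (1, "total_seq")])
        pvInit
      = (PySem.List.pyRange 0 n 1).foldl
          (fun d i => (pvQuad i).foldl (fun d p => d.insert p.1 p.2) d) pvInit := rfl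
  have hof : ∀ ps : List (String × List (Int × String)),
      PySem.Dict.ofList ps = PySem.Dict.empty.update ps := fun _ => rfl
  have hinit : (PySem.Dict.empty.update
      ((["input_ids", "past_valid_lengths", "global_hidden"] : List String).map
        (fun k => (k, pvAxes k)))) = pvInit := by decide
  rw [hstep, pvFoldlFlatMap, hof, List.map_append, pvUpdateAppend, hinit]
  show PySem.Dict.update pvInit _ = PySem.Dict.update pvInit _
  congr 1
  unfold pvLK pvQuad
  rw [List.map_flatMap]
  simp [pvAxes_pk, pvAxes_pv, pvAxes_prk, pvAxes_prv]

-- ===== VERDICT (by name: the statement is the Claim_ definition above) =====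
theorem io_names_spec : Claim_equal_io_names := by
  intro n _
  show io_names n = io_names_alt n
  exact Prod.ext (pvInEq n) (Prod.ext (pvOutEq n) (congrArg PySem.Dict.items (pvDynEq n)))
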